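-- pv_equiv track=rewrite | github.com/stehal/aoc2022 | day10/solution.py | x_register
-- ===== SOURCE A (Python) =====
-- def x_register(instructions):
--     x=[]
--     for i in instructions:
--         if i[0] == "addx":
--             x.append(0)
--             x.append(int(i[1]))
--         else:
--             x.append(0)
--     return [sum(x[:n]) +1 for n in range(0, len(x))]
-- ===== SOURCE B (Python) =====
-- def _emit(instructions, cur):
--     if not instructions:
--         return []
--     head, rest = instructions[0], instructions[1:]
--     if head[0] == "addx":
--         return [cur, cur] + _emit(rest, cur + int(head[1]))
--     return [cur] + _emit(rest, cur)
--
-- def x_register(instructions):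
--     return _emit(instructions, 1)
-- ===== Notes on version B (the rewrite author's own statement) =====
-- stated objective: alternative
-- what changed: Replaced A's two-phase build-delta-list-then-re-sum-every-prefix comprehension (sum(x[:n]) for each n) by a structural recursion that threads the running register value and emits each cycle's value directly.
import Mathlib
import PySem

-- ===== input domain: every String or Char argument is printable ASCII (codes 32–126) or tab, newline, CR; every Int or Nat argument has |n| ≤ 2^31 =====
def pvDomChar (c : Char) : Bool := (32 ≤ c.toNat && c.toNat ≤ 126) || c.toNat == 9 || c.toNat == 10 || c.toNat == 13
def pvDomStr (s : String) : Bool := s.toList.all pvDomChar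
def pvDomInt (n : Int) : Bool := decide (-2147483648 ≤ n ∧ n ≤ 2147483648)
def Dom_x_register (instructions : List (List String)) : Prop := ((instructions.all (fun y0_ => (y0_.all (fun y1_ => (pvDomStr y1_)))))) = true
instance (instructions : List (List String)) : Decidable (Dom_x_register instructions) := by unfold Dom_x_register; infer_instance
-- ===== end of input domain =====

-- B replaces A's "build the delta list, then re-sum its prefix for every cycle" scheme
-- by a structural recursion threading the running register value (objective: alternative).

-- ===== PORT A =====
-- one iteration of A's first loop: append the delta(s) of instruction i to x
def xrStepA (x : List Int) (i : List String) : List Int :=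
  match PySem.List.pyGet? i 0 with
  | some s =>
      if s = "addx" then
        x ++ [0, ((PySem.List.pyGet? i 1).bind PySem.Int.ofStr?).getD 0]  -- int(i[1]); none excluded by Pre_
      else x ++ [0]
  | none => x   -- i[0] IndexError; excluded by Pre_

def x_register (instructions : List (List String)) : List Int :=
  let x := instructions.foldl xrStepA []
  (PySem.List.pyRange 0 x.length 1).map
    (fun n => (PySem.List.slice x none (some n)).sum + 1)

-- ===== PORT B =====
-- B's recursive helper _emit(instructions, cur)
def xrEmit : List (List String) → Int → List Int
  | [], _ => []
  | i :: rest, cur =>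
      match PySem.List.pyGet? i 0 with
      | some s =>
          if s = "addx" then
            cur :: cur :: xrEmit rest (cur + ((PySem.List.pyGet? i 1).bind PySem.Int.ofStr?).getD 0)
          else cur :: xrEmit rest cur
      | none => []   -- head[0] IndexError; excluded by Pre_

def x_register_alt (instructions : List (List String)) : List Int :=
  xrEmit instructions 1

-- ===== PRECONDITION & SPEC =====
-- Pre_ excludes exactly the inputs where the Python A raises: an empty instruction (i[0] is an
-- IndexError) or an "addx" without a second token parseable by int() (IndexError / ValueError).
def Pre_x_register (instructions : List (List String)) : Prop :=
  ∀ i ∈ instructions, PySem.List.pyGet? i 0 ≠ none ∧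
    (PySem.List.pyGet? i 0 = some "addx" →
      ((PySem.List.pyGet? i 1).bind PySem.Int.ofStr?).isSome)
instance (instructions : List (List String)) : Decidable (Pre_x_register instructions) := by
  unfold Pre_x_register; infer_instance
def pvWitness_x_register : List (List String) := [["addx", "3"], ["noop"], ["addx", "-5"]]
def Spec_x_register (instructions : List (List String)) (out : List Int) : Prop := out = x_register_alt instructions
instance (instructions : List (List String)) (out : List Int) : Decidable (Spec_x_register instructions out) := by unfold Spec_x_register; infer_instance

-- ===== CLAIM (what is proved, stated in full; the proofs are below) =====
def Claim_equal_x_register : Prop := ∀ (instructions : List (List String)), Dom_x_register instructions → Pre_x_register instructions → Spec_x_register instructions (x_register instructions)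

-- ===== LEMMAS AND PROOFS =====

-- the delta(s) a single instruction contributes to A's list x
def deltasOf (i : List String) : List Int :=
  match PySem.List.pyGet? i 0 with
  | some s =>
      if s = "addx" then [0, ((PySem.List.pyGet? i 1).bind PySem.Int.ofStr?).getD 0]
      else [0]
  | none => []

-- running-prefix view: value c plus the sum of each proper prefix of xs
def prefixes (c : Int) (xs : List Int) : List Int :=
  (List.range xs.length).map (fun n => c + (xs.take n).sum)

lemma foldl_deltas (instructions : List (List String)) (x : List Int) :
    instructions.foldl xrStepA x = x ++ instructions.flatMap deltasOf := by
  induction instructions generalizing x with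
  | nil => simp
  | cons i rest ih =>
    have hstep : xrStepA x i = x ++ deltasOf i := by
      unfold xrStepA deltasOf
      cases h : PySem.List.pyGet? i 0 with
      | none => simp
      | some s => by_cases hs : s = "addx" <;> simp [hs]
    simp [List.foldl_cons, hstep, ih]

lemma prefixes_cons (c a : Int) (xs : List Int) :
    prefixes c (a :: xs) = c :: prefixes (c + a) xs := by
  unfold prefixes
  rw [List.length_cons, List.range_succ_eq_map, List.map_cons, List.map_map]
  simp [Function.comp, List.take_succ_cons, add_assoc]

lemma emit_eq_prefixes (instructions : List (List String))
    (hpre : Pre_x_register instructions) (c : Int) :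
    xrEmit instructions c = prefixes c (instructions.flatMap deltasOf) := by
  induction instructions generalizing c with
  | nil => simp [xrEmit, prefixes]
  | cons i rest ih =>
    have hi := hpre i (by simp)
    have hrest : Pre_x_register rest := fun j hj => hpre j (by simp [hj])
    cases h : PySem.List.pyGet? i 0 with
    | none => exact absurd h hi.1
    | some s =>
      by_cases hs : s = "addx"
      · subst hs
        simp only [xrEmit, h, List.flatMap_cons, deltasOf, if_true]
        rw [List.cons_append, List.cons_append, List.nil_append,
          prefixes_cons, prefixes_cons, add_zero, ih hrest]
      · simp only [xrEmit, h, List.flatMap_cons, deltasOf, if_neg hs]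
        rw [List.cons_append, List.nil_append,
          prefixes_cons, add_zero, ih hrest]

lemma pyRange_slice_eq_prefixes (x : List Int) :
    (PySem.List.pyRange 0 x.length 1).map
      (fun n => (PySem.List.slice x none (some n)).sum + 1) = prefixes 1 x := by
  unfold prefixes
  rw [show ((x.length : Int)) = ((0:Int) + (x.length : Nat)) by simp,
      PySem.List.pyRange_one, List.map_map]
  simp only [add_sub_cancel_left, Int.toNat_natCast]
  apply List.map_congr_left
  intro n _
  simp [PySem.List.slice_to_natCast, add_comm]

-- ===== VERDICT (by name: the statement is the Claim_ definition above) =====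
theorem x_register_spec : Claim_equal_x_register := by
  intro instructions _ hpre
  unfold Spec_x_register x_register x_register_alt
  rw [foldl_deltas, List.nil_append, pyRange_slice_eq_prefixes,
    emit_eq_prefixes instructions hpre 1]
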